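-- pv_equiv track=rewrite | github.com/fadedwind/Bade03--Game | chart_patterns.py | basic_hold
-- ===== SOURCE A (Python) =====
-- def basic_hold(pos,line,point,length,special = ''):
--     multi_line_pattern = ''
--     info = []
--     for i in range(1,5):
--         if i==line:
--             multi_line_pattern += 'H'
--             info.append('%d/%d/%s'%(point,length,special))
--         else:
--             multi_line_pattern += '_'
--             info.append('')
--
--     return write_multi_tiles(multi_line_pattern, pos, info)
--
-- def write_multi_tiles(pattern, beat_pos,info):
--     multi_tile_info = "%s,%d"%(pattern,beat_pos)
--
--     for i in range(4):
--         tile_data = ','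
--         tile_info = info[i].split('/')
--
--         if pattern[i]=='_':
--             pass
--         elif pattern[i]=='N':
--             if len(tile_info) == 1:
--                 info[i] += '/'
--             tile_data += info[i]
--         elif pattern[i]=='H':
--             if len(tile_info) == 2:
--                 info[i] += '/'
--             tile_data += info[i]
--         else:
--             raise ValueError("Invalid pattern given!")
--
--         multi_tile_info += tile_data
--
--     return multi_tile_info+'\n'
-- ===== SOURCE B (Python) =====
-- def basic_hold(pos, line, point, length, special=''):
--     # single fused pass: build the pattern header and the tile tail together
--     pattern = ''
--     tail = ''
--     for i in range(1, 5):
--         if i == line: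
--             pattern += 'H'
--             tail += ',%d/%d/%s' % (point, length, special)
--         else:
--             pattern += '_'
--             tail += ','
--     return '%s,%d%s\n' % (pattern, pos, tail)
-- ===== Notes on version B (the rewrite author's own statement) =====
-- stated objective: simpler
-- what changed: B fuses A's two phases (build pattern+info list, then rescan with split/length-check/branching in write_multi_tiles) into one loop that emits the tile tail directly, since the 'N' and ValueError branches and the '/'-append length checks are unreachable for patterns basic_hold builds.
import Mathlib
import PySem

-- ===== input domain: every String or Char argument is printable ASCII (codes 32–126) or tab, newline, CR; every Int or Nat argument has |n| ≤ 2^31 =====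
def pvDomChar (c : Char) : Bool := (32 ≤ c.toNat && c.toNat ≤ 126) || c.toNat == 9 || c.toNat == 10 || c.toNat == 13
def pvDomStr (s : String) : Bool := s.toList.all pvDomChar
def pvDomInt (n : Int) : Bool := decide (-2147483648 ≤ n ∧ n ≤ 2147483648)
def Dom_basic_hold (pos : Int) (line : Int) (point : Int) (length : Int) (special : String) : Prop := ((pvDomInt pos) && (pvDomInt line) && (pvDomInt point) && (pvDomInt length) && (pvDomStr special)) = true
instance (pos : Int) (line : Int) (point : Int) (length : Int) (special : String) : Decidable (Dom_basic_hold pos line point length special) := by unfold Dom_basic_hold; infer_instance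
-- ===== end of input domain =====

-- B fuses A's two loops (build pattern+info, then rescan in write_multi_tiles) into one pass; return values proved equal on all inputs.

-- ===== PORT A =====
-- helper write_multi_tiles, transliterated; state = (accumulated string, info list, since Python mutates info[i])
def pvWriteMultiTiles (pattern : String) (beat_pos : Int) (info : List String) : String :=
  let st := (PySem.List.pyRange 0 4 1).foldl (fun (st : String × List String) i =>
    let s := (PySem.List.pyGet? st.2 i).getD ""            -- info[i]; none = IndexError, unreachable (len info = 4)
    let tile_info := (PySem.Str.split? s "/").getD []       -- info[i].split('/'); sep "/" ≠ "" so never none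
    match PySem.Str.pyGet? pattern i with
    | some '_' => (st.1 ++ ",", st.2)
    | some 'N' =>
        let s' := if tile_info.length == 1 then s ++ "/" else s
        (st.1 ++ "," ++ s', st.2.set i.toNat s')            -- i ∈ range(4), nonnegative
    | some 'H' =>
        let s' := if tile_info.length == 2 then s ++ "/" else s
        (st.1 ++ "," ++ s', st.2.set i.toNat s')
    | _ => (st.1, st.2)                                     -- Python raises (ValueError/IndexError) here; unreachable from basic_hold
    ) (pattern ++ "," ++ PySem.Int.toStr beat_pos, info)
  st.1 ++ "\n"

def basic_hold (pos : Int) (line : Int) (point : Int) (length : Int) (special : String) : String :=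
  let st := (PySem.List.pyRange 1 5 1).foldl (fun (st : String × List String) i =>
    if i == line then
      (st.1 ++ "H", st.2 ++ [PySem.Int.toStr point ++ "/" ++ PySem.Int.toStr length ++ "/" ++ special])
    else
      (st.1 ++ "_", st.2 ++ [""])) ("", [])
  pvWriteMultiTiles st.1 pos st.2

-- ===== PORT B =====
def basic_hold_alt (pos : Int) (line : Int) (point : Int) (length : Int) (special : String) : String :=
  let st := (PySem.List.pyRange 1 5 1).foldl (fun (st : String × String) i =>
    if i == line then
      (st.1 ++ "H", st.2 ++ "," ++ PySem.Int.toStr point ++ "/" ++ PySem.Int.toStr length ++ "/" ++ special)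
    else
      (st.1 ++ "_", st.2 ++ ",")) ("", "")
  st.1 ++ "," ++ PySem.Int.toStr pos ++ st.2 ++ "\n"

-- ===== PRECONDITION & SPEC =====
def Spec_basic_hold (pos : Int) (line : Int) (point : Int) (length : Int) (special : String) (out : String) : Prop := out = basic_hold_alt pos line point length special
instance (pos : Int) (line : Int) (point : Int) (length : Int) (special : String) (out : String) : Decidable (Spec_basic_hold pos line point length special out) := by unfold Spec_basic_hold; infer_instance

-- ===== CLAIM (what is proved, stated in full; the proofs are below) =====
def Claim_equal_basic_hold : Prop := ∀ (pos : Int) (line : Int) (point : Int) (length : Int) (special : String), Dom_basic_hold pos line point length special → Spec_basic_hold pos line point length special (basic_hold pos line point length special)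

-- ===== LEMMAS AND PROOFS =====

theorem pv_go_len (fuel : Nat) : ∀ (l cur : List Char) (acc : List (List Char)),
    l.length < fuel →
    (PySem.Chars.splitOn.go ['/'] fuel l cur acc).length = acc.length + 1 + l.count '/' := by
  induction fuel with
  | zero => intro l cur acc h; omega
  | succ n ih =>
    intro l cur acc h
    cases l with
    | nil => simp [PySem.Chars.splitOn.go]
    | cons c rest =>
      simp only [PySem.Chars.splitOn.go]
      by_cases hc : c = '/'
      · subst hc
        simp only [List.isPrefixOf, List.count_cons, beq_self_eq_true, Bool.and_self, if_pos]
        rw [ih _ _ _ (by simp at h ⊢; omega)]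
        simp
        omega
      · have hp : List.isPrefixOf ['/'] (c :: rest) = false := by
          simp [List.isPrefixOf]; exact fun hh => (hc hh.symm).elim
        rw [hp]
        simp only [Bool.false_eq_true, if_false]
        rw [ih _ _ _ (by simp at h ⊢; omega)]
        simp [List.count_cons]
        intro hh; exact (hc hh).elim

theorem pv_split_len (s : List Char) :
    ((PySem.Chars.split? s ['/']).getD []).length = s.count '/' + 1 := by
  simp [PySem.Chars.split?, PySem.Chars.splitOn]
  rw [pv_go_len _ _ _ _ (by omega)]
  simp
  omega

-- the '%d/%d/%s' tile string contains at least two '/', so A's len==2 check never fires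
theorem pv_splitH_ne_two (p l sp : String) :
    ¬ ((((PySem.Str.split? (p ++ ("/" ++ (l ++ ("/" ++ sp)))) "/").getD [])).length = 2) := by
  simp only [PySem.Str.split?]
  have h : (p ++ ("/" ++ (l ++ ("/" ++ sp)))).toList
      = p.toList ++ ['/'] ++ l.toList ++ ['/'] ++ sp.toList := by
    simp [String.toList_append]
  rw [show ("/" : String).toList = ['/'] from rfl, h]
  cases hsp : PySem.Chars.split? (p.toList ++ ['/'] ++ l.toList ++ ['/'] ++ sp.toList) ['/'] with
  | none => simp [PySem.Chars.split?] at hsp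
  | some xs =>
    have := pv_split_len (p.toList ++ ['/'] ++ l.toList ++ ['/'] ++ sp.toList)
    rw [hsp] at this
    simp [List.count_append] at this ⊢
    omega

-- ===== VERDICT (by name: the statement is the Claim_ definition above) =====
theorem basic_hold_spec : Claim_equal_basic_hold := by
  intro pos line point length special _
  unfold Spec_basic_hold
  have hr : PySem.List.pyRange 1 5 1 = [1, 2, 3, 4] := rfl
  have hr0 : PySem.List.pyRange 0 4 1 = [0, 1, 2, 3] := rfl
  rcases (by omega : line = 1 ∨ line = 2 ∨ line = 3 ∨ line = 4 ∨ (line ≠ 1 ∧ line ≠ 2 ∧ line ≠ 3 ∧ line ≠ 4)) with h | h | h | h | ⟨h1, h2, h3, h4⟩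
  · subst h
    simp [basic_hold, basic_hold_alt, pvWriteMultiTiles, hr, hr0, PySem.List.pyGet?, PySem.List.pyIdx?,
      PySem.Str.pyGet?, pv_splitH_ne_two, String.append_assoc]
  · subst h
    simp [basic_hold, basic_hold_alt, pvWriteMultiTiles, hr, hr0, PySem.List.pyGet?, PySem.List.pyIdx?,
      PySem.Str.pyGet?, pv_splitH_ne_two, String.append_assoc]
  · subst h
    simp [basic_hold, basic_hold_alt, pvWriteMultiTiles, hr, hr0, PySem.List.pyGet?, PySem.List.pyIdx?,
      PySem.Str.pyGet?, pv_splitH_ne_two, String.append_assoc]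
  · subst h
    simp [basic_hold, basic_hold_alt, pvWriteMultiTiles, hr, hr0, PySem.List.pyGet?, PySem.List.pyIdx?,
      PySem.Str.pyGet?, pv_splitH_ne_two, String.append_assoc]
  · have e1 : ¬ ((1 : Int) = line) := fun hh => h1 hh.symm
    have e2 : ¬ ((2 : Int) = line) := fun hh => h2 hh.symm
    have e3 : ¬ ((3 : Int) = line) := fun hh => h3 hh.symm
    have e4 : ¬ ((4 : Int) = line) := fun hh => h4 hh.symm
    simp [basic_hold, basic_hold_alt, pvWriteMultiTiles, hr, hr0, e1, e2, e3, e4,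
      PySem.List.pyGet?, PySem.List.pyIdx?, PySem.Str.pyGet?, String.append_assoc]
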